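-- pv_equiv track=rewrite | github.com/mranthony89/analizzatorephp | plugins/ControlloPunti&Virgola.py | _is_in_html_block
-- ===== SOURCE A (Python) =====
-- from typing import List, Tuple
--
-- def _is_in_html_block(lines: List[str], line_num: int) -> bool:
--     """Verifica se una linea è all'interno di un blocco HTML (dopo ?>)"""
--     in_php = True
--     for i in range(line_num):
--         if '<?php' in lines[i] or '<?' in lines[i]:
--             in_php = True
--         elif '?>' in lines[i]:
--             in_php = False
--     return not in_php
-- ===== SOURCE B (Python) =====
-- def _is_in_html_block(lines, line_num):
--     """Scan backward from line_num-1 and stop at the last state-determining line."""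
--     for i in range(line_num - 1, -1, -1):
--         line = lines[i]
--         if '<?php' in line or '<?' in line:
--             return False
--         if '?>' in line:
--             return True
--     return False
-- ===== Notes on version B (the rewrite author's own statement) =====
-- stated objective: alternative
-- what changed: B scans backward from line_num-1 with early exit at the last line containing an open tag or '?>', instead of A's forward replay of the whole prefix maintaining an in_php flag.
import Mathlib
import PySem

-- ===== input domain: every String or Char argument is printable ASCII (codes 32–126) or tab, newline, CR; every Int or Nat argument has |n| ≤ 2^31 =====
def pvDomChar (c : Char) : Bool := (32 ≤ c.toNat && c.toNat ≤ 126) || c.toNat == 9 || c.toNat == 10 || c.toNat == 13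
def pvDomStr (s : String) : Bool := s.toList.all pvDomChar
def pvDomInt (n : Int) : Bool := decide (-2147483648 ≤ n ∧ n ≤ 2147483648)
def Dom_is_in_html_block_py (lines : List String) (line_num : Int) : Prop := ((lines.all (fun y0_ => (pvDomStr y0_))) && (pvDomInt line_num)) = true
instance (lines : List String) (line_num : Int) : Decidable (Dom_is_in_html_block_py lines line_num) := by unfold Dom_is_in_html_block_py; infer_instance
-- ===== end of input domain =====

-- B scans backward from line_num-1 with early exit at the last decisive line instead of A's forward replay of the whole prefix (objective: alternative).


-- ===== PORT A =====
-- lines[i] is ported as pyGetD with default ""; Pre_ guarantees every i of range(line_num) is in range.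
def is_in_html_block_py (lines : List String) (line_num : Int) : Bool :=
  let in_php := (PySem.List.pyRange 0 line_num 1).foldl
    (fun in_php i =>
      let line := PySem.List.pyGetD lines i ""
      if PySem.Str.isIn "<?php" line || PySem.Str.isIn "<?" line then true
      else if PySem.Str.isIn "?>" line then false
      else in_php) true
  !in_php

-- ===== PORT B =====
-- backward early-exit loop of Source B as structural recursion on the index (i+1 visits lines[i], then recurses downward)
def pvAltGo (lines : List String) : Nat → Bool
  | 0 => false
  | i+1 =>
    let line := PySem.List.pyGetD lines (i : Int) ""
    if PySem.Str.isIn "<?php" line || PySem.Str.isIn "<?" line then false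
    else if PySem.Str.isIn "?>" line then true
    else pvAltGo lines i

def is_in_html_block_py_alt (lines : List String) (line_num : Int) : Bool :=
  pvAltGo lines line_num.toNat

-- ===== PRECONDITION & SPEC =====
-- Pre_ excludes line_num > len(lines), where Python A raises IndexError.
def Pre_is_in_html_block_py (lines : List String) (line_num : Int) : Prop :=
  line_num ≤ (lines.length : Int)
instance (lines : List String) (line_num : Int) : Decidable (Pre_is_in_html_block_py lines line_num) := by unfold Pre_is_in_html_block_py; infer_instance

def pvWitness_is_in_html_block_py : List String × Int := (["<?php echo 1; ?>", "<p>"], 2)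

def Spec_is_in_html_block_py (lines : List String) (line_num : Int) (out : Bool) : Prop := out = is_in_html_block_py_alt lines line_num
instance (lines : List String) (line_num : Int) (out : Bool) : Decidable (Spec_is_in_html_block_py lines line_num out) := by unfold Spec_is_in_html_block_py; infer_instance

-- ===== CLAIM (what is proved, stated in full; the proofs are below) =====
def Claim_equal_is_in_html_block_py : Prop := ∀ (lines : List String) (line_num : Int), Dom_is_in_html_block_py lines line_num → Pre_is_in_html_block_py lines line_num → Spec_is_in_html_block_py lines line_num (is_in_html_block_py lines line_num)

-- ===== LEMMAS AND PROOFS =====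

-- the forward fold over range(n) negated equals the backward early-exit scan, for every n
theorem pvFold_eq_altGo (lines : List String) (n : Nat) :
    (!((PySem.List.pyRange 0 (n : Int) 1).foldl
      (fun in_php i =>
        let line := PySem.List.pyGetD lines i ""
        if PySem.Str.isIn "<?php" line || PySem.Str.isIn "<?" line then true
        else if PySem.Str.isIn "?>" line then false
        else in_php) true)) = pvAltGo lines n := by
  induction n with
  | zero => simp [PySem.List.pyRange_one_eq_nil, pvAltGo]
  | succ i ih =>
    have hsplit : PySem.List.pyRange 0 ((i + 1 : Nat) : Int) 1 =
        PySem.List.pyRange 0 (i : Int) 1 ++ [(i : Int)] := by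
      have := PySem.List.pyRange_one_succ_right (a := 0) (b := (i : Int)) (by positivity)
      push_cast
      simpa using this
    rw [hsplit, List.foldl_append]
    simp only [List.foldl_cons, List.foldl_nil, pvAltGo]
    by_cases h1 : (PySem.Str.isIn "<?php" (PySem.List.pyGetD lines (i : Int) "")
        || PySem.Str.isIn "<?" (PySem.List.pyGetD lines (i : Int) "")) = true
    · simp only [h1, if_true, Bool.not_true]
    · simp only [Bool.not_eq_true] at h1
      simp only [h1, Bool.false_eq_true, if_false]
      by_cases h2 : PySem.Str.isIn "?>" (PySem.List.pyGetD lines (i : Int) "") = true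
      · simp only [h2, if_true, Bool.not_false]
      · simp only [Bool.not_eq_true] at h2
        simp only [h2, Bool.false_eq_true, if_false]
        exact ih

-- ===== VERDICT (by name: the statement is the Claim_ definition above) =====
theorem is_in_html_block_py_spec : Claim_equal_is_in_html_block_py := by
  intro lines line_num _ _
  unfold Spec_is_in_html_block_py is_in_html_block_py is_in_html_block_py_alt
  by_cases h : line_num ≤ 0
  · rw [PySem.List.pyRange_one_eq_nil h]
    have h0 : line_num.toNat = 0 := Int.toNat_of_nonpos h
    simp [h0, pvAltGo]
  · have hn : line_num = (line_num.toNat : Int) := (Int.toNat_of_nonneg (by omega)).symm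
    rw [hn]
    exact pvFold_eq_altGo lines line_num.toNat
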